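-- pv_equiv track=rewrite | github.com/AldoMelfre/IA_PARCIAL_2_22310201_MeloFregosoAldoCarlo | ENFOQUE EN GRAFOS/_03_Satisfaccion_de_restricciones/_009_Acondicionamiento_del_corte.py | propagar_restricciones
-- ===== SOURCE A (Python) =====
-- def propagar_restricciones(tablero, dominios, restricciones):
--     """
--     Propaga las restricciones para reducir los dominios de las celdas.
--     :param tablero: Tablero de Sudoku con las celdas asignadas.
--     :param dominios: Diccionario con los dominios de cada celda.
--     :param restricciones: Diccionario con las restricciones entre celdas.
--     :return: Diccionario con los dominios reducidos, o None si hay inconsistencias.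
--     """
--     while True:
--         cambios = False
--         for celda, valores in dominios.items():
--             if len(valores) == 1:  # Si la celda tiene un único valor asignado
--                 valor = next(iter(valores))
--                 for vecina in restricciones[celda]:
--                     if valor in dominios[vecina]:
--                         dominios[vecina].remove(valor)  # Eliminamos el valor del dominio de las vecinas
--                         cambios = True
--                         if not dominios[vecina]:  # Si un dominio queda vacío, hay una inconsistencia
--                             return None
--         if not cambios:  # Si no hubo cambios, terminamos la propagación
--             break
--     return dominios
-- ===== SOURCE B (Python) =====
-- def propagar_restricciones(tablero, dominios, restricciones):
--     # Worklist propagation: process each cell once when its domain becomes a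
--     # singleton, instead of re-scanning every cell until a full pass changes nothing.
--     queue = [celda for celda, valores in dominios.items() if len(valores) == 1]
--     i = 0
--     while i < len(queue):
--         celda = queue[i]
--         i += 1
--         valores = dominios[celda]
--         if len(valores) != 1:
--             continue
--         valor = next(iter(valores))
--         for vecina in restricciones[celda]:
--             dominio_vecina = dominios[vecina]
--             if valor in dominio_vecina:
--                 dominio_vecina.remove(valor)
--                 if not dominio_vecina:
--                     return None
--                 if len(dominio_vecina) == 1:
--                     queue.append(vecina)
--     return dominios
-- ===== Notes on version B (the rewrite author's own statement) =====
-- stated objective: alternative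
-- what changed: A rescans every cell of `dominios` in full passes until a whole pass changes nothing; B instead queues the singleton cells once and processes a cell only when its domain has become a singleton, enqueueing a neighbour exactly when its domain shrinks to size 1 (worklist propagation instead of fixpoint re-scanning).
import Mathlib
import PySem

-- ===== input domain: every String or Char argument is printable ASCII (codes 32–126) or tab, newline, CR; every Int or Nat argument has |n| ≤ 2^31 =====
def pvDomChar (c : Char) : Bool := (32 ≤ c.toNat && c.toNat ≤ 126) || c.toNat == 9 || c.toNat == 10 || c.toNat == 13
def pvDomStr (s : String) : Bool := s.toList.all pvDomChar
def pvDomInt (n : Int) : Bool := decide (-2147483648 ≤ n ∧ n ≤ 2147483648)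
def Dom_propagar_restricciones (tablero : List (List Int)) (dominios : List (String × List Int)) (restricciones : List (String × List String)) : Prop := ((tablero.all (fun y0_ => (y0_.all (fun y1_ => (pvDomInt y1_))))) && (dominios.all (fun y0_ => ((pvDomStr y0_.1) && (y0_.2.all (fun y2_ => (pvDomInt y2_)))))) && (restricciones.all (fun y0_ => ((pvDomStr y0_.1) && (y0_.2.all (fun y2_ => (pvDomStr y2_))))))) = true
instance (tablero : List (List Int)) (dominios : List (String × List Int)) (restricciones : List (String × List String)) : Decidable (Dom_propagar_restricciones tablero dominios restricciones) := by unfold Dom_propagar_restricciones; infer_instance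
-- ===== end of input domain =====

-- B replaces A's repeated full passes over all cells (rescan until a pass changes nothing)
-- by a one-shot worklist: singleton cells are queued once and neighbours are enqueued only
-- when their domain shrinks to a singleton. Equivalence is about the RETURN value only
-- (both Pythons mutate the `dominios` argument in place).

-- ===== PORT A =====
abbrev PvSt := PySem.Dict String (List Int)
abbrev PvRestr := PySem.Dict String (List String)

-- measure used only for termination of the loops
def pvSize (d : PvSt) : Nat := ((PySem.Set.ofList d.keys).map (fun k => (d.getD k []).length)).sum

lemma pv_contains_of_mem_getD {d : PvSt} {w : String} {v : Int} (hv : v ∈ d.getD w []) :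
    d.contains w = true := by
  cases h : d.contains w
  · rw [PySem.Dict.getD_of_not_contains d [] h] at hv; cases hv
  · rfl

lemma pvSize_erase_lt (d : PvSt) (w : String) (v : Int) (hv : v ∈ d.getD w []) :
    pvSize (d.modify w [] (fun l => l.erase v)) < pvSize d := by
  have hcont := pv_contains_of_mem_getD hv
  have hkeys : (d.modify w [] (fun l => l.erase v)).keys = d.keys := by
    rw [PySem.Dict.keys_modify, PySem.Dict.keys_insert_of_contains d _ hcont]
  unfold pvSize
  rw [hkeys]
  apply List.sum_lt_sum
  · intro k _
    rw [PySem.Dict.getD_modify]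
    split_ifs with h
    · subst h
      exact Nat.le_of_lt_succ (by
        have := List.length_erase_of_mem hv
        have hpos := List.length_pos_of_mem hv
        omega)
    · exact le_rfl
  · refine ⟨w, (PySem.Set.mem_ofList _ _).2 ((PySem.Dict.contains_iff_mem_keys d w).1 hcont), ?_⟩
    rw [PySem.Dict.getD_modify]
    have h1 := List.length_erase_of_mem hv
    have h2 := List.length_pos_of_mem hv
    split_ifs with h
    · omega
    · exact absurd rfl h

-- inner loop of A: `for vecina in restricciones[celda]: ...`
def pvInnerA (v : Int) : List String → PvSt → Bool → Option (PvSt × Bool)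
  | [], d, ch => some (d, ch)
  | w :: ws, d, ch =>
    if v ∈ d.getD w [] then
      let d1 := d.modify w [] (fun l => l.erase v)
      if d1.getD w [] = [] then none
      else pvInnerA v ws d1 true
    else pvInnerA v ws d ch

-- one pass of A's `for celda, valores in dominios.items(): ...`
def pvPassA (restr : PvRestr) : List String → PvSt → Bool → Option (PvSt × Bool)
  | [], d, ch => some (d, ch)
  | c :: cs, d, ch =>
    let vs := d.getD c []
    if vs.length == 1 then
      match pvInnerA (vs.headD 0) (restr.getD c []) d ch with
      | none => none
      | some (d1, ch1) => pvPassA restr cs d1 ch1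
    else pvPassA restr cs d ch

lemma pvInnerA_size (v : Int) : ∀ (ws : List String) (d : PvSt) (ch : Bool) (d' : PvSt) (ch' : Bool),
    pvInnerA v ws d ch = some (d', ch') →
    pvSize d' ≤ pvSize d ∧ (ch' = false → ch = false ∧ d' = d) ∧
      (ch = false → ch' = true → pvSize d' < pvSize d) := by
  intro ws
  induction ws with
  | nil =>
    intro d ch d' ch' h
    simp only [pvInnerA, Option.some.injEq, Prod.mk.injEq] at h
    obtain ⟨rfl, rfl⟩ := h
    exact ⟨le_rfl, fun hf => ⟨hf, rfl⟩, fun h1 h2 => by simp [h1] at h2⟩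
  | cons w ws ih =>
    intro d ch d' ch' h
    simp only [pvInnerA] at h
    split_ifs at h with hv h0
    · have hlt := pvSize_erase_lt d w v hv
      have hih := ih _ _ _ _ h
      refine ⟨le_trans hih.1 (le_of_lt hlt), ?_, fun _ _ => lt_of_le_of_lt hih.1 hlt⟩
      intro hf
      exact absurd (hih.2.1 hf).1 (by simp)
    · exact ih _ _ _ _ h

lemma pvPassA_size (restr : PvRestr) : ∀ (cs : List String) (d : PvSt) (ch : Bool) (d' : PvSt) (ch' : Bool),
    pvPassA restr cs d ch = some (d', ch') →
    pvSize d' ≤ pvSize d ∧ (ch' = false → ch = false ∧ d' = d) ∧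
      (ch = false → ch' = true → pvSize d' < pvSize d) := by
  intro cs
  induction cs with
  | nil =>
    intro d ch d' ch' h
    simp only [pvPassA, Option.some.injEq, Prod.mk.injEq] at h
    obtain ⟨rfl, rfl⟩ := h
    exact ⟨le_rfl, fun hf => ⟨hf, rfl⟩, fun h1 h2 => by simp [h1] at h2⟩
  | cons c cs ih =>
    intro d ch d' ch' h
    simp only [pvPassA] at h
    split_ifs at h with hlen
    · rcases hI : pvInnerA ((d.getD c []).headD 0) (restr.getD c []) d ch with _ | ⟨d1, ch1⟩ <;>
        rw [hI] at h
      · cases h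
      · have hinner := pvInnerA_size _ _ _ _ _ _ hI
        have hih := ih _ _ _ _ h
        refine ⟨le_trans hih.1 hinner.1, ?_, ?_⟩
        · intro hf
          have h1 := hih.2.1 hf
          have h2 := hinner.2.1 h1.1
          exact ⟨h2.1, h1.2.trans h2.2⟩
        · intro hc0 hc1
          cases ch1 with
          | false =>
            obtain ⟨-, rfl⟩ := hinner.2.1 rfl
            exact hih.2.2 rfl hc1
          | true => exact lt_of_le_of_lt hih.1 (hinner.2.2 hc0 rfl)
    · exact ih _ _ _ _ h

-- A's `while True:` loop
def pvLoopA (restr : PvRestr) (keys : List String) (d : PvSt) : Option PvSt :=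
  match h : pvPassA restr keys d false with
  | none => none
  | some (d1, ch1) =>
    if hc : ch1 = true then pvLoopA restr keys d1 else some d1
termination_by pvSize d
decreasing_by exact (pvPassA_size restr keys d false d1 ch1 h).2.2 rfl hc

def propagar_restricciones (tablero : List (List Int)) (dominios : List (String × List Int)) (restricciones : List (String × List String)) : Option (List (String × List Int)) :=
  (pvLoopA (PySem.Dict.ofList restricciones) (PySem.Dict.ofList dominios).keys
      (PySem.Dict.ofList dominios)).map (fun f => f.items)

-- ===== PORT B =====
-- inner loop of B: removals plus enqueueing of neighbours that became singletons
def pvInnerB (v : Int) : List String → PvSt → List String → Option (PvSt × List String)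
  | [], d, q => some (d, q)
  | w :: ws, d, q =>
    if v ∈ d.getD w [] then
      let d1 := d.modify w [] (fun l => l.erase v)
      let l1 := d1.getD w []
      if l1 = [] then none
      else pvInnerB v ws d1 (if l1.length == 1 then q ++ [w] else q)
    else pvInnerB v ws d q

lemma pvInnerB_size (v : Int) : ∀ (ws : List String) (d : PvSt) (q : List String) (d' : PvSt) (q' : List String),
    pvInnerB v ws d q = some (d', q') →
    2 * pvSize d' + q'.length ≤ 2 * pvSize d + q.length := by
  intro ws
  induction ws with
  | nil =>
    intro d q d' q' h
    simp only [pvInnerB, Option.some.injEq, Prod.mk.injEq] at h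
    obtain ⟨rfl, rfl⟩ := h
    exact le_rfl
  | cons w ws ih =>
    intro d q d' q' h
    simp only [pvInnerB] at h
    split_ifs at h with hv h0 hq1
    · have hlt := pvSize_erase_lt d w v hv
      have hih := ih _ _ _ _ h
      have hlen : (q ++ [w]).length = q.length + 1 := by simp
      omega
    · have hlt := pvSize_erase_lt d w v hv
      have hih := ih _ _ _ _ h
      omega
    · exact ih _ _ _ _ h

-- B's worklist loop (queue with a moving index = pop from the front of the rest)
def pvLoopB (restr : PvRestr) (d : PvSt) (q : List String) : Option PvSt :=
  match q with
  | [] => some d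
  | c :: rest =>
    let vs := d.getD c []
    if vs.length == 1 then
      match h : pvInnerB (vs.headD 0) (restr.getD c []) d rest with
      | none => none
      | some (d1, q1) => pvLoopB restr d1 q1
    else pvLoopB restr d rest
termination_by 2 * pvSize d + q.length
decreasing_by
  · have := pvInnerB_size (vs.headD 0) (restr.getD c []) d rest d1 q1 h
    simp only [List.length_cons]
    omega
  · simp only [List.length_cons]
    omega

def propagar_restricciones_alt (tablero : List (List Int)) (dominios : List (String × List Int)) (restricciones : List (String × List String)) : Option (List (String × List Int)) :=
  (pvLoopB (PySem.Dict.ofList restricciones) (PySem.Dict.ofList dominios)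
      (((PySem.Dict.ofList dominios).items.filter (fun p => p.2.length == 1)).map (fun p => p.1))).map
    (fun f => f.items)

-- ===== PRECONDITION & SPEC =====
-- Pre_ excludes (a) inputs whose propagation would consult a cell missing from
-- `restricciones` or a neighbour missing from `dominios` (Python A raises KeyError on the
-- ones it actually consults; the clause is the closed-form superset "if any cell is a
-- singleton, both dicts are closed", so it also drops some inputs A happens to return on),
-- and (b) value lists with duplicates, which cannot arise from Python's set[int] domains.
def Pre_propagar_restricciones (tablero : List (List Int)) (dominios : List (String × List Int)) (restricciones : List (String × List String)) : Prop :=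
  (∀ p ∈ dominios, p.2.Nodup) ∧
  ((∃ p ∈ dominios, p.2.length = 1) →
    (∀ p ∈ dominios, p.1 ∈ restricciones.map Prod.fst) ∧
    (∀ q ∈ restricciones, q.1 ∈ dominios.map Prod.fst → ∀ w ∈ q.2, w ∈ dominios.map Prod.fst))
instance (tablero : List (List Int)) (dominios : List (String × List Int)) (restricciones : List (String × List String)) : Decidable (Pre_propagar_restricciones tablero dominios restricciones) := by unfold Pre_propagar_restricciones; infer_instance

def pvWitness_propagar_restricciones : List (List Int) × (List (String × List Int)) × (List (String × List String)) :=
  ([], [("a", [1]), ("b", [1, 2])], [("a", ["b"]), ("b", ["a"])])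

def Spec_propagar_restricciones (tablero : List (List Int)) (dominios : List (String × List Int)) (restricciones : List (String × List String)) (out : Option (List (String × List Int))) : Prop := out = propagar_restricciones_alt tablero dominios restricciones
instance (tablero : List (List Int)) (dominios : List (String × List Int)) (restricciones : List (String × List String)) (out : Option (List (String × List Int))) : Decidable (Spec_propagar_restricciones tablero dominios restricciones out) := by unfold Spec_propagar_restricciones; infer_instance

-- ===== CLAIM (what is proved, stated in full; the proofs are below) =====
def Claim_equal_propagar_restricciones : Prop := ∀ (tablero : List (List Int)) (dominios : List (String × List Int)) (restricciones : List (String × List String)), Dom_propagar_restricciones tablero dominios restricciones → Pre_propagar_restricciones tablero dominios restricciones → Spec_propagar_restricciones tablero dominios restricciones (propagar_restricciones tablero dominios restricciones)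

-- ===== LEMMAS AND PROOFS =====

-- abstract single propagation step: a singleton cell c = {v} erases v from a neighbour w,
-- without emptying it
def pvStep (restr : PvRestr) (d d' : PvSt) : Prop :=
  ∃ c v w, d.getD c [] = [v] ∧ w ∈ restr.getD c [] ∧ v ∈ d.getD w [] ∧
    (d.getD w []).erase v ≠ [] ∧ d' = d.modify w [] (fun l => l.erase v)

def pvReach (restr : PvRestr) : PvSt → PvSt → Prop := Relation.ReflTransGen (pvStep restr)

def pvGood (d : PvSt) : Prop := d.keys.Nodup ∧ ∀ k, (d.getD k []).Nodup

def pvFix (restr : PvRestr) (d : PvSt) : Prop :=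
  ∀ c v w, d.getD c [] = [v] → w ∈ restr.getD c [] → v ∉ d.getD w []

-- a conflict is reachable: some step would empty a domain
def pvConf (restr : PvRestr) (d : PvSt) : Prop :=
  ∃ e c v w, pvReach restr d e ∧ e.getD c [] = [v] ∧ w ∈ restr.getD c [] ∧ e.getD w [] = [v]

-- worklist invariant: the singleton side of every still-applicable step is queued
def pvInv (restr : PvRestr) (d : PvSt) (q : List String) : Prop :=
  ∀ c v w, d.getD c [] = [v] → w ∈ restr.getD c [] → v ∈ d.getD w [] → c ∈ q

lemma pvStep_getD {restr : PvRestr} {d d' : PvSt} (h : pvStep restr d d') (k : String) :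
    (d'.getD k []).Sublist (d.getD k []) := by
  obtain ⟨c, v, w, hc, hw, hv, hne, rfl⟩ := h
  rw [PySem.Dict.getD_modify]
  split_ifs with hkw
  · subst hkw; exact List.erase_sublist
  · exact List.Sublist.refl _

lemma pvStep_nonempty {restr : PvRestr} {d d' : PvSt} (h : pvStep restr d d') (k : String)
    (hne : d.getD k [] ≠ []) : d'.getD k [] ≠ [] := by
  obtain ⟨c, v, w, hc, hw, hv, hnev, rfl⟩ := h
  rw [PySem.Dict.getD_modify]
  split_ifs with hkw
  · subst hkw; exact hnev
  · exact hne

lemma pvStep_keys {restr : PvRestr} {d d' : PvSt} (h : pvStep restr d d') : d'.keys = d.keys := by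
  obtain ⟨c, v, w, hc, hw, hv, hne, rfl⟩ := h
  rw [PySem.Dict.keys_modify, PySem.Dict.keys_insert_of_contains d _ (pv_contains_of_mem_getD hv)]

lemma pvStep_nodup {restr : PvRestr} {d d' : PvSt} (h : pvStep restr d d')
    (hg : ∀ k, (d.getD k []).Nodup) : ∀ k, (d'.getD k []).Nodup := by
  obtain ⟨c, v, w, hc, hw, hv, hne, rfl⟩ := h
  intro k
  rw [PySem.Dict.getD_modify]
  split_ifs with hkw
  · exact (hg w).erase v
  · exact hg k

lemma pvReach_sublist {restr : PvRestr} {d d' : PvSt} (h : pvReach restr d d') (k : String) :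
    (d'.getD k []).Sublist (d.getD k []) := by
  induction h with
  | refl => exact List.Sublist.refl _
  | tail _ hstep ih => exact (pvStep_getD hstep k).trans ih

lemma pvReach_nonempty {restr : PvRestr} {d d' : PvSt} (h : pvReach restr d d') (k : String)
    (hne : d.getD k [] ≠ []) : d'.getD k [] ≠ [] := by
  induction h with
  | refl => exact hne
  | tail _ hstep ih => exact pvStep_nonempty hstep k ih

lemma pvReach_keys {restr : PvRestr} {d d' : PvSt} (h : pvReach restr d d') : d'.keys = d.keys := by
  induction h with
  | refl => rfl
  | tail _ hstep ih => exact (pvStep_keys hstep).symm ▸ ih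

lemma pvReach_good {restr : PvRestr} {d d' : PvSt} (hg : pvGood d) (h : pvReach restr d d') :
    pvGood d' := by
  induction h with
  | refl => exact hg
  | tail _ hstep ih => exact ⟨(pvStep_keys hstep).symm ▸ ih.1, pvStep_nodup hstep ih.2⟩

lemma pvConf_step {restr : PvRestr} {d d1 : PvSt} (h : pvStep restr d d1) (hc : pvConf restr d1) :
    pvConf restr d := by
  obtain ⟨e, c, v, w, hre, h1, h2, h3⟩ := hc
  exact ⟨e, c, v, w, Relation.ReflTransGen.head h hre, h1, h2, h3⟩

lemma pvConf_reach {restr : PvRestr} {d d1 : PvSt} (h : pvReach restr d d1) (hc : pvConf restr d1) :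
    pvConf restr d := by
  obtain ⟨e, c, v, w, hre, h1, h2, h3⟩ := hc
  exact ⟨e, c, v, w, Relation.ReflTransGen.trans h hre, h1, h2, h3⟩

lemma pv_singleton_of (l : List Int) (v : Int) (hne : l ≠ []) (hnd : l.Nodup)
    (hsub : ∀ x ∈ l, x = v) : l = [v] := by
  cases l with
  | nil => exact absurd rfl hne
  | cons a t =>
    have ha : a = v := hsub a (List.mem_cons_self ..)
    subst ha
    cases t with
    | nil => rfl
    | cons b t' =>
      have hb : b = a := hsub b (by simp)
      rw [List.nodup_cons] at hnd
      exact absurd (hb ▸ List.mem_cons_self ..) hnd.1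

-- master lemma: a reachable fixpoint F lies (pointwise, as a set) below every reachable state
lemma pvReach_supset {restr : PvRestr} {d0 F : PvSt} (hgood : pvGood d0)
    (hF : pvReach restr d0 F) (hfix : pvFix restr F) :
    ∀ {X}, pvReach restr d0 X → ∀ k x, x ∈ F.getD k [] → x ∈ X.getD k [] := by
  intro X hX
  induction hX with
  | refl => exact fun k x hx => (pvReach_sublist hF k).subset hx
  | tail hXb hstep ih =>
    obtain ⟨c, v, w, hc, hw, hv, hne, rfl⟩ := hstep
    intro k x hx
    have hxb := ih k x hx
    rw [PySem.Dict.getD_modify]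
    split_ifs with hkw
    · rw [hkw] at hx hxb
      have h0c : d0.getD c [] ≠ [] := by
        intro h0
        have hs := pvReach_sublist hXb c
        rw [hc, h0] at hs
        simpa using hs
      have hFc : F.getD c [] = [v] := by
        apply pv_singleton_of _ _ (pvReach_nonempty hF c h0c) ((pvReach_good hgood hF).2 c)
        intro y hy
        have hyb := ih c y hy
        rw [hc] at hyb
        simpa using hyb
      have hvF : v ∉ F.getD w [] := hfix c v w hFc hw
      have hxv : x ≠ v := fun he => hvF (he ▸ hx)
      exact (List.mem_erase_of_ne hxv).2 hxb
    · exact hxb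

-- a conflict cannot be reachable if a (nonempty-preserving) fixpoint is
lemma pvConf_elim {restr : PvRestr} {d0 F : PvSt} (hgood : pvGood d0)
    (hF : pvReach restr d0 F) (hfix : pvFix restr F) (hc : pvConf restr d0) : False := by
  obtain ⟨e, c, v, w, hre, h1, h2, h3⟩ := hc
  have hsup := pvReach_supset hgood hF hfix hre
  have h0c : d0.getD c [] ≠ [] := by
    intro h0
    have hs := pvReach_sublist hre c
    rw [h1, h0] at hs
    simpa using hs
  have h0w : d0.getD w [] ≠ [] := by
    intro h0
    have hs := pvReach_sublist hre w
    rw [h3, h0] at hs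
    simpa using hs
  have hFc : F.getD c [] = [v] := by
    apply pv_singleton_of _ _ (pvReach_nonempty hF c h0c) ((pvReach_good hgood hF).2 c)
    intro y hy
    have hye := hsup c y hy
    rw [h1] at hye
    simpa using hye
  have hFw : F.getD w [] = [v] := by
    apply pv_singleton_of _ _ (pvReach_nonempty hF w h0w) ((pvReach_good hgood hF).2 w)
    intro y hy
    have hye := hsup w y hy
    rw [h3] at hye
    simpa using hye
  exact hfix c v w hFc h2 (hFw ▸ List.mem_cons_self ..)

-- two reachable fixpoints are equal
lemma pvFinal_eq {restr : PvRestr} {d0 FA FB : PvSt} (hgood : pvGood d0)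
    (hA : pvReach restr d0 FA) (hB : pvReach restr d0 FB)
    (fa : pvFix restr FA) (fb : pvFix restr FB) : FA = FB := by
  apply PySem.Dict.ext
  have hgA := pvReach_good hgood hA
  have hgB := pvReach_good hgood hB
  have hgetD : ∀ k, FA.getD k [] = FB.getD k [] := by
    intro k
    have s1 := pvReach_sublist hA k
    have s2 := pvReach_sublist hB k
    have hperm : (FA.getD k []).Perm (FB.getD k []) := by
      rw [List.perm_ext_iff_of_nodup (s1.nodup (hgood.2 k)) (s2.nodup (hgood.2 k))]
      exact fun a => ⟨fun ha => pvReach_supset hgood hA fa hB k a ha,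
        fun hb => pvReach_supset hgood hB fb hA k a hb⟩
    exact (List.Nodup.perm_iff_eq_of_sublist (hgood.2 k) s1 s2).mp hperm
  rw [PySem.Dict.items_eq_map_keys FA hgA.1 [], PySem.Dict.items_eq_map_keys FB hgB.1 [],
    pvReach_keys hA, pvReach_keys hB]
  exact List.map_congr_left (fun k _ => by rw [hgetD k])

lemma pv_erase_nil {l : List Int} {v : Int} (hv : v ∈ l) (h : l.erase v = []) : l = [v] := by
  have hlen := List.length_erase_of_mem hv
  have hpos := List.length_pos_of_mem hv
  rw [h, List.length_nil] at hlen
  obtain ⟨a, rfl⟩ := List.length_eq_one_iff.mp (show l.length = 1 by omega)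
  simp at hv
  rw [hv]

-- run lemmas: A
lemma pvInnerA_run {restr : PvRestr} {c : String} {v : Int} :
    ∀ (ws : List String) (d : PvSt) (ch : Bool) (d' : PvSt) (ch' : Bool),
      d.getD c [] = [v] → (∀ w ∈ ws, w ∈ restr.getD c []) →
      pvInnerA v ws d ch = some (d', ch') →
      pvReach restr d d' ∧ d'.getD c [] = [v] ∧
        (ch' = false → ch = false ∧ d' = d ∧ ∀ w ∈ ws, v ∉ d.getD w []) := by
  intro ws
  induction ws with
  | nil =>
    intro d ch d' ch' hc hws h
    simp only [pvInnerA, Option.some.injEq, Prod.mk.injEq] at h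
    obtain ⟨rfl, rfl⟩ := h
    exact ⟨Relation.ReflTransGen.refl, hc, fun hf => ⟨hf, rfl, by simp⟩⟩
  | cons w ws ih =>
    intro d ch d' ch' hc hws h
    simp only [pvInnerA] at h
    split_ifs at h with hv h0
    · have hwr : w ∈ restr.getD c [] := hws w (List.mem_cons_self ..)
      have herase : (d.modify w [] (fun l => l.erase v)).getD w [] = (d.getD w []).erase v := by
        rw [PySem.Dict.getD_modify]; simp
      have hstep : pvStep restr d (d.modify w [] (fun l => l.erase v)) :=
        ⟨c, v, w, hc, hwr, hv, by rw [← herase]; exact h0, rfl⟩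
      have hc1 : (d.modify w [] (fun l => l.erase v)).getD c [] = [v] := by
        rw [PySem.Dict.getD_modify]
        split_ifs with hcw
        · exfalso
          apply h0
          rw [hcw] at hc
          rw [herase, hc]
          simp
        · exact hc
      have hih := ih _ true _ _ hc1 (fun w' hw' => hws w' (List.mem_cons_of_mem _ hw')) h
      refine ⟨Relation.ReflTransGen.head hstep hih.1, hih.2.1, ?_⟩
      intro hf
      exact absurd (hih.2.2 hf).1 (by simp)
    · have hih := ih _ ch _ _ hc (fun w' hw' => hws w' (List.mem_cons_of_mem _ hw')) h
      refine ⟨hih.1, hih.2.1, ?_⟩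
      intro hf
      obtain ⟨h1, h2, h3⟩ := hih.2.2 hf
      refine ⟨h1, h2, ?_⟩
      intro w' hw'
      rcases List.mem_cons.mp hw' with rfl | hw''
      · exact hv
      · exact h3 w' hw''

lemma pvInnerA_conf {restr : PvRestr} {c : String} {v : Int} :
    ∀ (ws : List String) (d : PvSt) (ch : Bool),
      d.getD c [] = [v] → (∀ w ∈ ws, w ∈ restr.getD c []) →
      pvInnerA v ws d ch = none → pvConf restr d := by
  intro ws
  induction ws with
  | nil =>
    intro d ch hc hws h
    simp only [pvInnerA] at h
    simp at h
  | cons w ws ih =>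
    intro d ch hc hws h
    simp only [pvInnerA] at h
    have herase : (d.modify w [] (fun l => l.erase v)).getD w [] = (d.getD w []).erase v := by
      rw [PySem.Dict.getD_modify]; simp
    split_ifs at h with hv h0
    · rw [herase] at h0
      exact ⟨d, c, v, w, Relation.ReflTransGen.refl, hc, hws w (List.mem_cons_self ..),
        pv_erase_nil hv h0⟩
    · have hwr : w ∈ restr.getD c [] := hws w (List.mem_cons_self ..)
      have hstep : pvStep restr d (d.modify w [] (fun l => l.erase v)) :=
        ⟨c, v, w, hc, hwr, hv, by rw [← herase]; exact h0, rfl⟩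
      have hc1 : (d.modify w [] (fun l => l.erase v)).getD c [] = [v] := by
        rw [PySem.Dict.getD_modify]
        split_ifs with hcw
        · exfalso
          apply h0
          rw [hcw] at hc
          rw [herase, hc]
          simp
        · exact hc
      exact pvConf_step hstep
        (ih _ true hc1 (fun w' hw' => hws w' (List.mem_cons_of_mem _ hw')) h)
    · exact ih _ ch hc (fun w' hw' => hws w' (List.mem_cons_of_mem _ hw')) h

lemma pvPassA_run {restr : PvRestr} :
    ∀ (cs : List String) (d : PvSt) (ch : Bool) (d' : PvSt) (ch' : Bool),
      pvPassA restr cs d ch = some (d', ch') →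
      pvReach restr d d' ∧
        (ch' = false → ch = false ∧ d' = d ∧
          ∀ c ∈ cs, ∀ v w, d.getD c [] = [v] → w ∈ restr.getD c [] → v ∉ d.getD w []) := by
  intro cs
  induction cs with
  | nil =>
    intro d ch d' ch' h
    simp only [pvPassA, Option.some.injEq, Prod.mk.injEq] at h
    obtain ⟨rfl, rfl⟩ := h
    exact ⟨Relation.ReflTransGen.refl, fun hf => ⟨hf, rfl, by simp⟩⟩
  | cons c cs ih =>
    intro d ch d' ch' h
    simp only [pvPassA] at h
    split_ifs at h with hlen
    · obtain ⟨x, hx⟩ := List.length_eq_one_iff.mp (by simpa using hlen)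
      rcases hI : pvInnerA ((d.getD c []).headD 0) (restr.getD c []) d ch with _ | ⟨d1, ch1⟩ <;>
        rw [hI] at h
      · simp at h
      · have hhead : (d.getD c []).headD 0 = x := by rw [hx]; rfl
        rw [hhead] at hI
        have hrun := pvInnerA_run (restr := restr) (c := c) (v := x) _ _ _ _ _ hx
          (fun w hw => hw) hI
        have hih := ih _ _ _ _ h
        refine ⟨hrun.1.trans hih.1, ?_⟩
        intro hf
        obtain ⟨hch1, rfl, hP⟩ := hih.2 hf
        obtain ⟨hch, rfl, hQ⟩ := hrun.2.2 hch1
        refine ⟨hch, rfl, ?_⟩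
        intro c' hc' v' w' hgc' hw' hv'
        rcases List.mem_cons.mp hc' with rfl | hc''
        · have hvx : v' = x := by
            rw [hx] at hgc'
            exact (List.cons.injEq .. ▸ hgc').1.symm
          exact hQ w' hw' (hvx ▸ hv')
        · exact hP c' hc'' v' w' hgc' hw' hv'
    · have hih := ih _ _ _ _ h
      refine ⟨hih.1, fun hf => ?_⟩
      obtain ⟨h1, rfl, hP⟩ := hih.2 hf
      refine ⟨h1, rfl, ?_⟩
      intro c' hc' v' w' hgc' hw' hv'
      rcases List.mem_cons.mp hc' with rfl | hc''
      · have hl1 : (d'.getD c' []).length = 1 := by rw [hgc']; rfl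
        exact absurd hl1 (by simpa using hlen)
      · exact hP c' hc'' v' w' hgc' hw' hv'

lemma pvPassA_conf {restr : PvRestr} :
    ∀ (cs : List String) (d : PvSt) (ch : Bool),
      pvPassA restr cs d ch = none → pvConf restr d := by
  intro cs
  induction cs with
  | nil =>
    intro d ch h
    simp only [pvPassA] at h
    simp at h
  | cons c cs ih =>
    intro d ch h
    simp only [pvPassA] at h
    split_ifs at h with hlen
    · obtain ⟨x, hx⟩ := List.length_eq_one_iff.mp (by simpa using hlen)
      rcases hI : pvInnerA ((d.getD c []).headD 0) (restr.getD c []) d ch with _ | ⟨d1, ch1⟩ <;>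
        rw [hI] at h
      · have hhead : (d.getD c []).headD 0 = x := by rw [hx]; rfl
        rw [hhead] at hI
        exact pvInnerA_conf _ _ _ hx (fun w hw => hw) hI
      · have hhead : (d.getD c []).headD 0 = x := by rw [hx]; rfl
        rw [hhead] at hI
        have hrun := pvInnerA_run (restr := restr) (c := c) (v := x) _ _ _ _ _ hx
          (fun w hw => hw) hI
        exact pvConf_reach hrun.1 (ih _ _ h)
    · exact ih _ _ h

lemma pvLoopA_run {restr : PvRestr} {keys : List String} :
    ∀ (d : PvSt), pvGood d → (∀ k, d.getD k [] ≠ [] → k ∈ keys) →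
      (∀ F, pvLoopA restr keys d = some F → pvReach restr d F ∧ pvFix restr F) ∧
        (pvLoopA restr keys d = none → pvConf restr d) := by
  intro d
  induction d using pvLoopA.induct restr keys with
  | case1 x hP =>
    intro _hg _hk
    have hval : pvLoopA restr keys x = none := by
      rw [pvLoopA]; split <;> simp_all
    refine ⟨fun F hF => ?_, fun _ => pvPassA_conf keys x false hP⟩
    rw [hval] at hF
    cases hF
  | case2 x d1 hP ih =>
    intro hg hk
    have hreach1 : pvReach restr x d1 := (pvPassA_run keys x false d1 true hP).1
    have hg1 := pvReach_good hg hreach1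
    have hk1 : ∀ k, d1.getD k [] ≠ [] → k ∈ keys := by
      intro k hne
      apply hk k
      intro h0
      have hs := pvReach_sublist hreach1 k
      rw [h0] at hs
      exact hne (List.sublist_nil.mp hs)
    have hrec := ih hg1 hk1
    have hval : pvLoopA restr keys x = pvLoopA restr keys d1 := by
      rw [pvLoopA]; split <;> simp_all
    constructor
    · intro F hF
      rw [hval] at hF
      obtain ⟨hr, hfix⟩ := hrec.1 F hF
      exact ⟨Relation.ReflTransGen.trans hreach1 hr, hfix⟩
    · intro hN
      rw [hval] at hN
      exact pvConf_reach hreach1 (hrec.2 hN)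
  | case3 x d1 ch1 hP hch =>
    intro hg hk
    have hrun := pvPassA_run keys x false d1 ch1 hP
    have hch1 : ch1 = false := by
      cases ch1
      · rfl
      · exact absurd rfl hch
    subst hch1
    obtain ⟨-, hdx, hPfix⟩ := hrun.2 rfl
    have hval : pvLoopA restr keys x = some d1 := by
      rw [pvLoopA]; split <;> simp_all
    constructor
    · intro F hF
      rw [hval] at hF
      have hFx : F = x := by rw [← Option.some.inj hF, hdx]
      subst hFx
      exact ⟨Relation.ReflTransGen.refl,
        fun c v w hc hw => hPfix c (hk c (by rw [hc]; simp)) v w hc hw⟩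
    · intro hN
      rw [hval] at hN
      cases hN

-- run lemmas: B
lemma pvInnerB_run {restr : PvRestr} {c : String} {v : Int} :
    ∀ (ws : List String) (d : PvSt) (q : List String) (d' : PvSt) (q' : List String),
      d.getD c [] = [v] → (∀ w ∈ ws, w ∈ restr.getD c []) → (∀ k, (d.getD k []).Nodup) →
      pvInnerB v ws d q = some (d', q') →
      pvReach restr d d' ∧ d'.getD c [] = [v] ∧ (∀ x ∈ q, x ∈ q') ∧
        (∀ w ∈ ws, v ∉ d'.getD w []) ∧
        (∀ k, (d'.getD k []).length = 1 → d'.getD k [] = d.getD k [] ∨ k ∈ q') := by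
  intro ws
  induction ws with
  | nil =>
    intro d q d' q' hc hws hnd h
    simp only [pvInnerB, Option.some.injEq, Prod.mk.injEq] at h
    obtain ⟨rfl, rfl⟩ := h
    exact ⟨Relation.ReflTransGen.refl, hc, fun x hx => hx, by simp, fun k _ => Or.inl rfl⟩
  | cons w ws ih =>
    intro d q d' q' hc hws hnd h
    simp only [pvInnerB] at h
    have herase : (d.modify w [] (fun l => l.erase v)).getD w [] = (d.getD w []).erase v := by
      rw [PySem.Dict.getD_modify]; simp
    split_ifs at h with hv h0 hq1
    · -- removal, became singleton: recursion with q ++ [w]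
      have hwr : w ∈ restr.getD c [] := hws w (List.mem_cons_self ..)
      have hstep : pvStep restr d (d.modify w [] (fun l => l.erase v)) :=
        ⟨c, v, w, hc, hwr, hv, by rw [← herase]; exact h0, rfl⟩
      have hc1 : (d.modify w [] (fun l => l.erase v)).getD c [] = [v] := by
        rw [PySem.Dict.getD_modify]
        split_ifs with hcw
        · exfalso
          apply h0
          rw [hcw] at hc
          rw [herase, hc]
          simp
        · exact hc
      have hnd1 := pvStep_nodup hstep hnd
      have hih := ih _ _ _ _ hc1 (fun w' hw' => hws w' (List.mem_cons_of_mem _ hw')) hnd1 h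
      have hv1 : v ∉ (d.modify w [] (fun l => l.erase v)).getD w [] := by
        rw [herase]
        exact fun hm => (((hnd w).mem_erase_iff).mp hm).1 rfl
      refine ⟨Relation.ReflTransGen.head hstep hih.1, hih.2.1, ?_, ?_, ?_⟩
      · exact fun x hx => hih.2.2.1 x (List.mem_append_left _ hx)
      · intro w'' hw''
        rcases List.mem_cons.mp hw'' with rfl | hw3
        · exact fun hm => hv1 ((pvReach_sublist hih.1 w'').subset hm)
        · exact hih.2.2.2.1 w'' hw3
      · intro k hk1
        rcases hih.2.2.2.2 k hk1 with heq | hq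
        · by_cases hkw : k = w
          · subst hkw
            exact Or.inr (hih.2.2.1 k (List.mem_append_right _ (List.mem_cons_self ..)))
          · refine Or.inl ?_
            rw [heq, PySem.Dict.getD_modify, if_neg hkw]
        · exact Or.inr hq
    · -- removal, no enqueue
      have hwr : w ∈ restr.getD c [] := hws w (List.mem_cons_self ..)
      have hstep : pvStep restr d (d.modify w [] (fun l => l.erase v)) :=
        ⟨c, v, w, hc, hwr, hv, by rw [← herase]; exact h0, rfl⟩
      have hc1 : (d.modify w [] (fun l => l.erase v)).getD c [] = [v] := by
        rw [PySem.Dict.getD_modify]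
        split_ifs with hcw
        · exfalso
          apply h0
          rw [hcw] at hc
          rw [herase, hc]
          simp
        · exact hc
      have hnd1 := pvStep_nodup hstep hnd
      have hih := ih _ _ _ _ hc1 (fun w' hw' => hws w' (List.mem_cons_of_mem _ hw')) hnd1 h
      have hv1 : v ∉ (d.modify w [] (fun l => l.erase v)).getD w [] := by
        rw [herase]
        exact fun hm => (((hnd w).mem_erase_iff).mp hm).1 rfl
      refine ⟨Relation.ReflTransGen.head hstep hih.1, hih.2.1, hih.2.2.1, ?_, ?_⟩
      · intro w'' hw''
        rcases List.mem_cons.mp hw'' with rfl | hw3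
        · exact fun hm => hv1 ((pvReach_sublist hih.1 w'').subset hm)
        · exact hih.2.2.2.1 w'' hw3
      · intro k hk1
        rcases hih.2.2.2.2 k hk1 with heq | hq
        · by_cases hkw : k = w
          · subst hkw
            exfalso
            apply hq1
            have : (d.modify k [] (fun l => l.erase v)).getD k [] = d'.getD k [] := heq.symm
            rw [this, hk1]
            rfl
          · refine Or.inl ?_
            rw [heq, PySem.Dict.getD_modify, if_neg hkw]
        · exact Or.inr hq
    · -- skip
      have hih := ih _ _ _ _ hc (fun w' hw' => hws w' (List.mem_cons_of_mem _ hw')) hnd h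
      refine ⟨hih.1, hih.2.1, hih.2.2.1, ?_, hih.2.2.2.2⟩
      intro w'' hw''
      rcases List.mem_cons.mp hw'' with rfl | hw3
      · exact fun hm => hv ((pvReach_sublist hih.1 w'').subset hm)
      · exact hih.2.2.2.1 w'' hw3

lemma pvInnerB_conf {restr : PvRestr} {c : String} {v : Int} :
    ∀ (ws : List String) (d : PvSt) (q : List String),
      d.getD c [] = [v] → (∀ w ∈ ws, w ∈ restr.getD c []) →
      pvInnerB v ws d q = none → pvConf restr d := by
  intro ws
  induction ws with
  | nil =>
    intro d q hc hws h
    simp [pvInnerB] at h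
  | cons w ws ih =>
    intro d q hc hws h
    simp only [pvInnerB] at h
    have herase : (d.modify w [] (fun l => l.erase v)).getD w [] = (d.getD w []).erase v := by
      rw [PySem.Dict.getD_modify]; simp
    split_ifs at h with hv h0 hq1
    · rw [herase] at h0
      exact ⟨d, c, v, w, Relation.ReflTransGen.refl, hc, hws w (List.mem_cons_self ..),
        pv_erase_nil hv h0⟩
    all_goals (
      first
        | (exact ih _ _ hc (fun w' hw' => hws w' (List.mem_cons_of_mem _ hw')) h)
        | (refine pvConf_step
            (⟨c, v, w, hc, hws w (List.mem_cons_self ..), hv, by rw [← herase]; exact h0, rfl⟩ :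
              pvStep restr d (d.modify w [] (fun l => l.erase v)))
            (ih _ _ ?_ (fun w' hw' => hws w' (List.mem_cons_of_mem _ hw')) h)
           ;
           rw [PySem.Dict.getD_modify]
           ;
           split_ifs with hcw
           ;
           · exfalso
             apply h0
             rw [hcw] at hc
             rw [herase, hc]
             simp
           ;
           · exact hc))

lemma pvLoopB_run {restr : PvRestr} :
    ∀ (d : PvSt) (q : List String), pvGood d → pvInv restr d q →
      (∀ F, pvLoopB restr d q = some F → pvReach restr d F ∧ pvFix restr F) ∧
        (pvLoopB restr d q = none → pvConf restr d) := by
  intro d q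
  induction d, q using pvLoopB.induct restr with
  | case1 d =>
    intro _hg hinv
    constructor
    · intro F hF
      rw [pvLoopB] at hF
      have hdF := Option.some.inj hF
      subst hdF
      exact ⟨Relation.ReflTransGen.refl,
        fun c v w hc hw hvmem => by simpa using hinv c v w hc hw hvmem⟩
    · intro hN
      rw [pvLoopB] at hN
      cases hN
  | case2 d c rest vs hlen hI =>
    intro _hg _hinv
    have hvs : vs = d.getD c [] := rfl
    rw [hvs] at hlen hI
    obtain ⟨x, hx⟩ := List.length_eq_one_iff.mp (by simpa using hlen)
    have hhead : (d.getD c []).headD 0 = x := by rw [hx]; rfl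
    rw [hhead] at hI
    have hconf := pvInnerB_conf (restr := restr) (c := c) (v := x) _ _ _ hx (fun w hw => hw) hI
    have hval : pvLoopB restr d (c :: rest) = none := by
      rw [pvLoopB]
      split <;> (try split) <;> simp_all
    constructor
    · intro F hF
      rw [hval] at hF
      cases hF
    · intro _
      exact hconf
  | case3 d c rest vs hlen d1 q1 hI ih =>
    intro hg hinv
    have hvs : vs = d.getD c [] := rfl
    rw [hvs] at hlen hI
    obtain ⟨x, hx⟩ := List.length_eq_one_iff.mp (by simpa using hlen)
    have hhead : (d.getD c []).headD 0 = x := by rw [hx]; rfl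
    rw [hhead] at hI
    have hrun := pvInnerB_run (restr := restr) (c := c) (v := x) _ _ _ _ _ hx
      (fun w hw => hw) hg.2 hI
    have hg1 := pvReach_good hg hrun.1
    have hinv1 : pvInv restr d1 q1 := by
      intro c1 v1 w1 h1 hw1 hv1
      rcases hrun.2.2.2.2 c1 (by rw [h1]; rfl) with heq | hq
      · have h1d : d.getD c1 [] = [v1] := by rw [← heq, h1]
        have hv1d : v1 ∈ d.getD w1 [] := (pvReach_sublist hrun.1 w1).subset hv1
        rcases List.mem_cons.mp (hinv c1 v1 w1 h1d hw1 hv1d) with heqc | hcr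
        · exfalso
          rw [heqc] at h1d
          rw [hx] at h1d
          have hvx : x = v1 := (List.cons.injEq .. ▸ h1d).1
          rw [heqc] at hw1
          exact hrun.2.2.2.1 w1 hw1 (hvx ▸ hv1)
        · exact hrun.2.2.1 c1 hcr
      · exact hq
    have hrec := ih hg1 hinv1
    have hval : pvLoopB restr d (c :: rest) = pvLoopB restr d1 q1 := by
      rw [pvLoopB]
      split <;> (try split) <;> simp_all
    constructor
    · intro F hF
      rw [hval] at hF
      obtain ⟨hr, hfix⟩ := hrec.1 F hF
      exact ⟨Relation.ReflTransGen.trans hrun.1 hr, hfix⟩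
    · intro hN
      rw [hval] at hN
      exact pvConf_reach hrun.1 (hrec.2 hN)
  | case4 d c rest vs hlen ih =>
    intro hg hinv
    have hvs : vs = d.getD c [] := rfl
    rw [hvs] at hlen
    have hinv1 : pvInv restr d rest := by
      intro c1 v1 w1 h1 hw1 hv1
      rcases List.mem_cons.mp (hinv c1 v1 w1 h1 hw1 hv1) with heqc | hcr
      · exfalso
        apply hlen
        rw [heqc] at h1
        rw [h1]
        rfl
      · exact hcr
    have hrec := ih hg hinv1
    have hval : pvLoopB restr d (c :: rest) = pvLoopB restr d rest := by
      rw [pvLoopB]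
      split <;> simp_all
    exact ⟨fun F hF => hrec.1 F (hval ▸ hF), fun hN => hrec.2 (hval ▸ hN)⟩

-- initial-state lemmas
lemma pv_mem_items_update {κ ν : Type} [BEq κ] [LawfulBEq κ] :
    ∀ (ps : List (κ × ν)) (d : PySem.Dict κ ν) (p : κ × ν),
      p ∈ (d.update ps).items → p ∈ d.items ∨ p ∈ ps := by
  intro ps
  induction ps with
  | nil => exact fun d p h => Or.inl h
  | cons a ps ih =>
    intro d p h
    have h' : p ∈ ((d.insert a.1 a.2).update ps).items := by
      simpa [PySem.Dict.update, List.foldl_cons] using h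
    rcases ih _ _ h' with hd | hp
    · rcases (PySem.Dict.mem_items_insert _ _ _ _).mp hd with heq | ⟨hm, -⟩
      · exact Or.inr (heq ▸ List.mem_cons_self ..)
      · exact Or.inl hm
    · exact Or.inr (List.mem_cons_of_mem _ hp)

lemma pv_mem_items_ofList {κ ν : Type} [BEq κ] [LawfulBEq κ] (ps : List (κ × ν)) (p : κ × ν)
    (h : p ∈ (PySem.Dict.ofList ps).items) : p ∈ ps := by
  rcases pv_mem_items_update ps PySem.Dict.empty p (by simpa [PySem.Dict.ofList] using h)
    with h0 | h1
  · simp [PySem.Dict.empty] at h0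
  · exact h1

lemma pv_good_init (dominios : List (String × List Int)) (hnd : ∀ p ∈ dominios, p.2.Nodup) :
    pvGood (PySem.Dict.ofList dominios) := by
  refine ⟨PySem.Dict.nodup_keys_ofList dominios, ?_⟩
  intro k
  rcases hg : (PySem.Dict.ofList dominios).get? k with _ | l
  · rw [PySem.Dict.getD_eq_get?_getD, hg]
    simp
  · rw [PySem.Dict.getD_eq_get?_getD, hg]
    have hm := PySem.Dict.mem_items_of_get?_eq_some _ hg
    simpa using hnd _ (pv_mem_items_ofList dominios _ hm)

lemma pv_keys_init (dominios : List (String × List Int)) :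
    ∀ k, (PySem.Dict.ofList dominios).getD k [] ≠ [] → k ∈ (PySem.Dict.ofList dominios).keys := by
  intro k hne
  by_contra hk
  rw [PySem.Dict.getD_eq_get?_getD,
    (PySem.Dict.get?_eq_none_iff_not_mem_keys _ _).mpr hk] at hne
  simp at hne

lemma pv_inv_init (restr : PvRestr) (dominios : List (String × List Int)) :
    pvInv restr (PySem.Dict.ofList dominios)
      (((PySem.Dict.ofList dominios).items.filter (fun p => p.2.length == 1)).map (fun p => p.1)) := by
  intro c v w hc _hw _hv
  have hg : (PySem.Dict.ofList dominios).get? c = some [v] := by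
    rcases hq : (PySem.Dict.ofList dominios).get? c with _ | l
    · rw [PySem.Dict.getD_eq_get?_getD, hq] at hc
      simp at hc
    · rw [PySem.Dict.getD_eq_get?_getD, hq] at hc
      simp at hc
      rw [hc]
  have hm := PySem.Dict.mem_items_of_get?_eq_some _ hg
  simp only [List.mem_map]
  exact ⟨(c, [v]), List.mem_filter.mpr ⟨hm, by simp⟩, rfl⟩

-- ===== VERDICT (by name: the statement is the Claim_ definition above) =====
theorem propagar_restricciones_spec : Claim_equal_propagar_restricciones := by
  unfold Claim_equal_propagar_restricciones
  intro tablero dominios restricciones _hDom hPre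
  unfold Spec_propagar_restricciones propagar_restricciones propagar_restricciones_alt
  set rr := PySem.Dict.ofList restricciones with hrr
  set dd := PySem.Dict.ofList dominios with hdd
  set q0 := ((dd.items.filter (fun p => p.2.length == 1)).map (fun p => p.1)) with hq0
  have hgood : pvGood dd := pv_good_init dominios hPre.1
  have hka : ∀ k, dd.getD k [] ≠ [] → k ∈ dd.keys := pv_keys_init dominios
  have hinv : pvInv rr dd q0 := pv_inv_init rr dominios
  have hA := pvLoopA_run (restr := rr) (keys := dd.keys) dd hgood hka
  have hB := pvLoopB_run (restr := rr) dd q0 hgood hinv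
  have hmain : pvLoopA rr dd.keys dd = pvLoopB rr dd q0 := by
    rcases hLA : pvLoopA rr dd.keys dd with _ | FA <;>
      rcases hLB : pvLoopB rr dd q0 with _ | FB
    · rfl
    · exact absurd (hA.2 hLA) (fun hc => pvConf_elim hgood (hB.1 FB hLB).1 (hB.1 FB hLB).2 hc)
    · exact absurd (hB.2 hLB) (fun hc => pvConf_elim hgood (hA.1 FA hLA).1 (hA.1 FA hLA).2 hc)
    · exact congrArg some
        (pvFinal_eq hgood (hA.1 FA hLA).1 (hB.1 FB hLB).1 (hA.1 FA hLA).2 (hB.1 FB hLB).2)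
  exact congrArg (Option.map (fun f => f.items)) hmain
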